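-- pv_equiv track=rewrite | github.com/AdamZhouSE/pythonHomework | Code/CodeRecords/2600/60793/276647.py | find_max_sub_ls
-- ===== SOURCE A (Python) =====
-- def find_max_sub_ls(ls: list) -> int:
--     result = 0
--     temp = []
--     for j in ls:
--         if j != -1:
--             temp.append(j)
--         else:
--             result = max(result, sum(temp))
--             temp = []
--     return result
-- ===== SOURCE B (Python) =====
-- def find_max_sub_ls(ls: list) -> int:
--     best = 0
--     pos = 0
--     while True:
--         try:
--             i = ls.index(-1, pos)
--         except ValueError:
--             return best
--         best = max(best, sum(ls[pos:i]))
--         pos = i + 1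
-- ===== Notes on version B (the rewrite author's own statement) =====
-- stated objective: alternative
-- what changed: B scans for -1 markers with list.index and sums each slice between consecutive markers directly, instead of A's per-element loop that appends into a temp buffer and sums it at each marker.
import Mathlib
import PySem

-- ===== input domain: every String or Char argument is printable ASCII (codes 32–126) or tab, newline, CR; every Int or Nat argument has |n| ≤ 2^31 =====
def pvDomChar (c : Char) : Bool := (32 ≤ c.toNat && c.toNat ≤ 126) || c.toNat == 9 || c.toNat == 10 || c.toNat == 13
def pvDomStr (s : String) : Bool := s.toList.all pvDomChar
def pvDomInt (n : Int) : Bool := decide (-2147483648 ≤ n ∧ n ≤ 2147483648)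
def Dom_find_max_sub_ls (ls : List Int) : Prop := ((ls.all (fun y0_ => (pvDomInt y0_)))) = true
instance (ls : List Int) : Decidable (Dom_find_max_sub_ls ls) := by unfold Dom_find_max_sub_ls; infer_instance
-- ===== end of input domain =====

-- B replaces A's per-element buffer loop by scanning for -1 markers with list.index and summing the slice between consecutive markers (alternative decomposition, same cost).


-- ===== PORT A =====
-- for j in ls: append to temp unless j == -1, at -1 fold sum(temp) into result
def findA_loop : List Int → Int → List Int → Int
  | [], result, _ => result
  | j :: rest, result, temp =>
    if j ≠ -1 then findA_loop rest result (temp ++ [j])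
    else findA_loop rest (max result temp.sum) []

def find_max_sub_ls (ls : List Int) : Int := findA_loop ls 0 []

-- ===== PORT B =====
-- Source B's while-loop: ls.index(-1, pos) / slice-sum / pos = i + 1, ported over the remaining suffix (drop pos ls)
def findB_loop (rest : List Int) (best : Int) : Int :=
  match h : PySem.List.index? rest (-1) with
  | none => best
  | some i => findB_loop (rest.drop (i + 1)) (max best ((rest.take i).sum))
termination_by rest.length
decreasing_by
  obtain ⟨hk, _⟩ := PySem.List.getElem_of_index?_eq_some h
  simp; omega

def find_max_sub_ls_alt (ls : List Int) : Int := findB_loop ls 0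

-- ===== PRECONDITION & SPEC =====
def Spec_find_max_sub_ls (ls : List Int) (out : Int) : Prop := out = find_max_sub_ls_alt ls
instance (ls : List Int) (out : Int) : Decidable (Spec_find_max_sub_ls ls out) := by unfold Spec_find_max_sub_ls; infer_instance

-- ===== CLAIM (what is proved, stated in full; the proofs are below) =====
def Claim_equal_find_max_sub_ls : Prop := ∀ (ls : List Int), Dom_find_max_sub_ls ls → Spec_find_max_sub_ls ls (find_max_sub_ls ls)

-- ===== LEMMAS AND PROOFS =====
theorem findB_loop_none {rest : List Int} (h : PySem.List.index? rest (-1) = none)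
    (best : Int) : findB_loop rest best = best := by
  rw [findB_loop.eq_def, h]

theorem findB_loop_some {rest : List Int} {i : Nat} (h : PySem.List.index? rest (-1) = some i)
    (best : Int) :
    findB_loop rest best = findB_loop (rest.drop (i + 1)) (max best ((rest.take i).sum)) := by
  rw [findB_loop.eq_def, h]

theorem loops_agree : ∀ (ls temp : List Int) (r : Int), (-1 : Int) ∉ temp →
    findA_loop ls r temp = findB_loop (temp ++ ls) r := by
  intro ls
  induction ls with
  | nil =>
    intro temp r h
    rw [findA_loop, List.append_nil,
      findB_loop_none ((PySem.List.index?_eq_none_iff temp (-1)).mpr h)]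
  | cons j rest ih =>
    intro temp r h
    by_cases hj : j = -1
    · subst hj
      have hidx : PySem.List.index? (temp ++ (-1 : Int) :: rest) (-1) = some temp.length := by
        have h1 := PySem.List.index?_append_of_mem (l := temp ++ [(-1 : Int)]) rest
          (v := (-1 : Int)) (by simp)
        rw [List.append_assoc, List.singleton_append] at h1
        rw [h1]
        exact PySem.List.index?_append_singleton_self temp (-1) h
      rw [findA_loop, if_neg (by simp), findB_loop_some hidx]
      have htake : (temp ++ (-1 : Int) :: rest).take temp.length = temp := by
        simp [List.take_left']
      have hdrop : (temp ++ (-1 : Int) :: rest).drop (temp.length + 1) = rest := by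
        rw [show temp ++ (-1 : Int) :: rest = (temp ++ [(-1 : Int)]) ++ rest by simp,
          show temp.length + 1 = (temp ++ [(-1 : Int)]).length by simp]
        exact List.drop_left
      rw [htake, hdrop]
      simpa using ih [] (max r temp.sum) (by simp)
    · rw [findA_loop, if_pos hj,
        show temp ++ j :: rest = (temp ++ [j]) ++ rest by simp]
      exact ih (temp ++ [j]) r (by simp [h]; exact fun e => hj e.symm)

-- ===== VERDICT (by name: the statement is the Claim_ definition above) =====
theorem find_max_sub_ls_spec : Claim_equal_find_max_sub_ls := by
  intro ls _
  unfold Spec_find_max_sub_ls find_max_sub_ls find_max_sub_ls_alt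
  simpa using loops_agree ls [] 0 (by simp)
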